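-- pv_equiv track=rewrite | github.com/macedos03/NS-Model | NS v2/src/yc/favar.py | _effective_p_grid
-- ===== SOURCE A (Python) =====
-- def _effective_p_grid(n_rows: int, n_states: int, p_max: int) -> list[int]:
-- 	valid = []
-- 	for p in range(1, p_max + 1):
-- 		T_eff = n_rows - p
-- 		params_per_eq = 1 + n_states * p
-- 		if T_eff > params_per_eq + 1:
-- 			valid.append(p)
-- 	return valid
-- ===== SOURCE B (Python) =====
-- def _effective_p_grid(n_rows: int, n_states: int, p_max: int) -> list[int]:
--     # A lag p is usable iff p*(n_states + 1) <= n_rows - 3, so the valid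
--     # orders are simply the prefix 1..k for the largest such p (capped at p_max).
--     k = min(p_max, (n_rows - 3) // (n_states + 1))
--     return list(range(1, k + 1))
-- ===== Notes on version B (the rewrite author's own statement) =====
-- stated objective: faster
-- what changed: Replaces A's per-p loop testing n_rows - p > 2 + n_states*p with a closed-form cutoff: the valid lag orders are the prefix 1..min(p_max, (n_rows-3)//(n_states+1)), computed with one floor division; Pre_ restricts to the natural domain n_states >= 0 (a state count), where the monotone-prefix closed form is valid -- for negative n_states B divides by zero or assumes the wrong monotonicity.
-- outside the precondition, e.g. on _effective_p_grid(10, -1, 5): A returns [1, 2, 3, 4, 5], B raises ZeroDivisionError; on _effective_p_grid(10, -2, 5): A returns [1, 2, 3, 4, 5], B returns []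
import Mathlib
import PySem

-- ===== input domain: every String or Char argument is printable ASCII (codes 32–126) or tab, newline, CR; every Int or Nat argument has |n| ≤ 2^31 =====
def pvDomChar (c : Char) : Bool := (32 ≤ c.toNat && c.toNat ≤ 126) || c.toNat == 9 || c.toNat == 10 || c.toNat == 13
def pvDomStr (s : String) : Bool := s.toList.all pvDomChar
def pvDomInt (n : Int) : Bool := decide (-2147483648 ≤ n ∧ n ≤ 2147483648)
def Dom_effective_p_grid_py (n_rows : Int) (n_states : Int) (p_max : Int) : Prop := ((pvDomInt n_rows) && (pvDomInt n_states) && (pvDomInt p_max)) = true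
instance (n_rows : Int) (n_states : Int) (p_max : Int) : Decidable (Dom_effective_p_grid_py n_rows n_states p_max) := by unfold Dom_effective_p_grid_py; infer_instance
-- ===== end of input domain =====

-- B replaces A's per-p loop by a closed-form prefix cutoff from one floor division (objective: faster).

-- ===== PORT A =====
def effective_p_grid_py (n_rows : Int) (n_states : Int) (p_max : Int) : List Int :=
  (PySem.List.pyRange 1 (p_max + 1) 1).foldl
    (fun valid p =>
      let T_eff := n_rows - p
      let params_per_eq := 1 + n_states * p
      if T_eff > params_per_eq + 1 then valid ++ [p] else valid)
    []

-- ===== PORT B =====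
def effective_p_grid_py_alt (n_rows : Int) (n_states : Int) (p_max : Int) : List Int :=
  let k := min p_max (PySem.Int.floordiv (n_rows - 3) (n_states + 1))
  PySem.List.pyRange 1 (k + 1) 1

-- ===== PRECONDITION & SPEC =====
-- Pre_ restricts to the natural domain n_states ≥ 0 (n_states is a count of states):
-- for negative n_states, B's closed-form prefix divides by zero (n_states = -1) or
-- assumes the wrong monotonicity, while A still returns a value there.
def Pre_effective_p_grid_py (n_rows : Int) (n_states : Int) (p_max : Int) : Prop := 0 ≤ n_states
instance (n_rows : Int) (n_states : Int) (p_max : Int) : Decidable (Pre_effective_p_grid_py n_rows n_states p_max) := by unfold Pre_effective_p_grid_py; infer_instance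
def pvWitness_effective_p_grid_py : Int × Int × Int := (10, 1, 5)

def Spec_effective_p_grid_py (n_rows : Int) (n_states : Int) (p_max : Int) (out : List Int) : Prop := out = effective_p_grid_py_alt n_rows n_states p_max
instance (n_rows : Int) (n_states : Int) (p_max : Int) (out : List Int) : Decidable (Spec_effective_p_grid_py n_rows n_states p_max out) := by unfold Spec_effective_p_grid_py; infer_instance

-- ===== CLAIM (what is proved, stated in full; the proofs are below) =====
def Claim_equal_effective_p_grid_py : Prop := ∀ (n_rows : Int) (n_states : Int) (p_max : Int), Dom_effective_p_grid_py n_rows n_states p_max → Pre_effective_p_grid_py n_rows n_states p_max → Spec_effective_p_grid_py n_rows n_states p_max (effective_p_grid_py n_rows n_states p_max)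

-- ===== LEMMAS AND PROOFS =====

-- Filtering a step-1 range by an upper bound keeps a prefix range.
theorem filter_pyRange_le (a b k : Int) :
    (PySem.List.pyRange a b 1).filter (fun x => decide (x ≤ k))
      = PySem.List.pyRange a (min b (k + 1)) 1 := by
  by_cases hab : b ≤ a
  · rw [PySem.List.pyRange_one_eq_nil hab, PySem.List.pyRange_one_eq_nil (by omega)]
    rfl
  · set m := max a (min b (k + 1)) with hm
    rw [PySem.List.pyRange_one_append a m b (by omega) (by omega), List.filter_append]
    have h1 : (PySem.List.pyRange a m 1).filter (fun x => decide (x ≤ k))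
        = PySem.List.pyRange a m 1 := by
      apply List.filter_eq_self.mpr
      intro x hx
      rw [PySem.List.mem_pyRange_one] at hx
      simp only [decide_eq_true_eq]
      omega
    have h2 : (PySem.List.pyRange m b 1).filter (fun x => decide (x ≤ k)) = [] := by
      apply List.filter_eq_nil_iff.mpr
      intro x hx
      rw [PySem.List.mem_pyRange_one] at hx
      simp only [decide_eq_true_eq]
      omega
    rw [h1, h2, List.append_nil]
    by_cases h : a ≤ min b (k + 1)
    · congr 1; omega
    · rw [PySem.List.pyRange_one_eq_nil (by omega), PySem.List.pyRange_one_eq_nil (by omega)]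

-- A's loop is the filter of range(1, p_max+1) by the strict-inequality test.
theorem effective_p_grid_py_eq_filter (n_rows n_states p_max : Int) :
    effective_p_grid_py n_rows n_states p_max
      = (PySem.List.pyRange 1 (p_max + 1) 1).filter
          (fun p => decide (n_rows - p > (1 + n_states * p) + 1)) := by
  unfold effective_p_grid_py
  simp only []
  rw [PySem.List.foldl_append_ite_eq_filter]
  simp

theorem effective_p_grid_py_spec' (n_rows n_states p_max : Int) (hs : 0 ≤ n_states) :
    effective_p_grid_py n_rows n_states p_max = effective_p_grid_py_alt n_rows n_states p_max := by
  rw [effective_p_grid_py_eq_filter]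
  unfold effective_p_grid_py_alt
  simp only []
  set c := n_states + 1 with hc
  set a := n_rows - 3 with ha
  have hpos : (0:Int) < c := by omega
  have hpred : ∀ p ∈ PySem.List.pyRange 1 (p_max + 1) 1,
      decide (n_rows - p > (1 + n_states * p) + 1)
        = decide (p ≤ PySem.Int.floordiv a c) := by
    intro p _
    have hiff : p ≤ PySem.Int.floordiv a c ↔ p * c ≤ a :=
      PySem.Int.le_floordiv_iff_mul_le hpos
    have : (n_rows - p > (1 + n_states * p) + 1) ↔ (p ≤ PySem.Int.floordiv a c) := by
      rw [hiff]; constructor <;> intro h <;> nlinarith [h]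
    simp [this]
  rw [List.filter_congr hpred, filter_pyRange_le]
  congr 1
  omega

-- ===== VERDICT (by name: the statement is the Claim_ definition above) =====
theorem effective_p_grid_py_spec : Claim_equal_effective_p_grid_py := by
  intro n_rows n_states p_max _ hpre
  exact effective_p_grid_py_spec' n_rows n_states p_max hpre
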